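-- pv_equiv track=rewrite | github.com/bakunobu/exercise | 1400_basic_tasks/chap_6/6_59.py | min_num_count
-- ===== SOURCE A (Python) =====
-- def min_num_count(n:int) -> int:
--     counter = 0
--     min_num = 9
--     while n:
--         num = n % 10
--         if num == min_num:
--             counter += 1
--         if num < min_num:
--             min_num = num
--             counter = 1
--         n //= 10
--     return(counter)
-- ===== SOURCE B (Python) =====
-- def min_num_count(n: int) -> int:
--     digits = []
--     while n:
--         digits.append(n % 10)
--         n //= 10
--     if not digits:
--         return 0
--     return digits.count(min(digits))
-- ===== Notes on version B (the rewrite author's own statement) =====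
-- stated objective: simpler
-- what changed: Replaces A's fused single-pass min-tracking-with-counter-reset loop by a plain decomposition: extract the digit list, then return digits.count(min(digits)) (0 for an empty list).
import Mathlib
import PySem

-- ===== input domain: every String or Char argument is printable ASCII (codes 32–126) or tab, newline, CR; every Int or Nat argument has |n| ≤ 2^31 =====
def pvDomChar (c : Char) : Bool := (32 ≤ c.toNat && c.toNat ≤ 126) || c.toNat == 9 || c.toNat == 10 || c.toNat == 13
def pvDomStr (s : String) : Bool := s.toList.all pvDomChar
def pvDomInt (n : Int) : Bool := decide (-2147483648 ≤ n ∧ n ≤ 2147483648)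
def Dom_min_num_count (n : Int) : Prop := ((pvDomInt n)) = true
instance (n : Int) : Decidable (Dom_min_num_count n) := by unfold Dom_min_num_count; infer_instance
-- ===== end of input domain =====

-- B is a plain decomposition of A: extract the digit list, then count the minimum digit.
-- Return-value equivalence only; proved for n ≥ 0 (both loops run forever for negative n).

-- ===== PORT A =====
-- A's while-loop; fuel bounds the iterations (n.natAbs + 1 suffices for every n ≥ 0)
def aLoop : Nat → Int → Int → Int → Int
  | 0, _, counter, _ => counter
  | fuel + 1, n, counter, min_num =>
    if n = 0 then counter
    else
      let num := PySem.Int.mod n 10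
      let counter := if num = min_num then counter + 1 else counter
      let (min_num, counter) := if num < min_num then (num, (1 : Int)) else (min_num, counter)
      aLoop fuel (PySem.Int.floordiv n 10) counter min_num

def min_num_count (n : Int) : Int := aLoop (n.natAbs + 1) n 0 9

-- ===== PORT B =====
-- B's digit-extraction while-loop, same fuel bound
def bDigits : Nat → Int → List Int
  | 0, _ => []
  | fuel + 1, n =>
    if n = 0 then []
    else PySem.Int.mod n 10 :: bDigits fuel (PySem.Int.floordiv n 10)

def min_num_count_alt (n : Int) : Int :=
  let digits := bDigits (n.natAbs + 1) n
  match PySem.List.min? digits (fun x => x) with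
  | none => 0                                   -- 'if not digits: return 0'
  | some m => PySem.List.count digits m

-- ===== PRECONDITION & SPEC =====
-- Pre_ excludes negative n, on which A's (and B's) while-loop never terminates (n //= 10 stalls at -1).
def Pre_min_num_count (n : Int) : Prop := 0 ≤ n
instance (n : Int) : Decidable (Pre_min_num_count n) := by unfold Pre_min_num_count; infer_instance
def pvWitness_min_num_count : Int := (907)

def Spec_min_num_count (n : Int) (out : Int) : Prop := out = min_num_count_alt n
instance (n : Int) (out : Int) : Decidable (Spec_min_num_count n out) := by unfold Spec_min_num_count; infer_instance

-- ===== CLAIM (what is proved, stated in full; the proofs are below) =====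
def Claim_equal_min_num_count : Prop := ∀ (n : Int), Dom_min_num_count n → Pre_min_num_count n → Spec_min_num_count n (min_num_count n)

-- ===== LEMMAS AND PROOFS =====

-- A's loop body as a fold step over the pair (counter, min_num)
def aStep (p : Int × Int) (d : Int) : Int × Int :=
  let c := if d = p.2 then p.1 + 1 else p.1
  if d < p.2 then (1, d) else (c, p.2)

theorem aLoop_eq_fold : ∀ (fuel : Nat) (n c m : Int),
    aLoop fuel n c m = ((bDigits fuel n).foldl aStep (c, m)).1 := by
  intro fuel
  induction fuel with
  | zero => intro n c m; simp [aLoop, bDigits]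
  | succ k ih =>
    intro n c m
    by_cases h : n = 0
    · simp [aLoop, bDigits, h]
    · rcases lt_trichotomy (n % 10) m with h1 | h1 | h1
      · simp [aLoop, bDigits, h, ih, aStep, h1, ne_of_lt h1]
      · simp [aLoop, bDigits, h, ih, aStep, h1]
      · simp [aLoop, bDigits, h, ih, aStep, not_lt.mpr h1.le, ne_of_gt h1]

theorem foldl_min_le_init : ∀ (ds : List Int) (a : Int), ds.foldl min a ≤ a := by
  intro ds
  induction ds with
  | nil => intro a; simp
  | cons d t ih =>
    intro a
    calc (d :: t).foldl min a = t.foldl min (min a d) := by simp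
    _ ≤ min a d := ih _
    _ ≤ a := min_le_left _ _

theorem fold_inv : ∀ (ds : List Int) (c m : Int),
    ((ds.foldl aStep (c, m)).1 : Int)
      = (ds.count (ds.foldl min m) : Int) + (if ds.foldl min m = m then c else 0) := by
  intro ds
  induction ds with
  | nil => intro c m; simp
  | cons d t ih =>
    intro c m
    have hmm : (d :: t).foldl min m = t.foldl min (min m d) := by simp
    have hle : t.foldl min (min m d) ≤ min m d := foldl_min_le_init _ _
    rcases lt_trichotomy d m with hd | hd | hd
    · have h2 : ¬ d = m := ne_of_lt hd
      have hmin : min m d = d := min_eq_right (le_of_lt hd)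
      simp only [List.foldl_cons, aStep, if_pos hd, if_neg h2, ih, hmm, hmin]
      have hne : ¬ t.foldl min d = m := by
        rw [hmin] at hle; intro h; rw [h] at hle; omega
      by_cases he : t.foldl min d = d <;>
        simp [List.count_cons, he, hne, Ne.symm, eq_comm (a := d)] <;> omega
    · have hmin : min m d = m := min_eq_left (le_of_eq hd.symm)
      simp only [List.foldl_cons, aStep, if_pos hd, if_neg (by omega : ¬ d < m), ih, hmm, hmin]
      subst hd
      by_cases he : t.foldl min d = d <;> simp [List.count_cons, he, eq_comm (a := d)] <;> omega
    · have h2 : ¬ d = m := by omega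
      have hmin : min m d = m := min_eq_left (le_of_lt hd)
      simp only [List.foldl_cons, aStep, if_neg h2, if_neg (by omega : ¬ d < m), ih, hmm, hmin]
      have hne : ¬ d = t.foldl min m := by
        rw [hmin] at hle; intro h; omega
      simp [List.count_cons, hne, eq_comm (a := d)]

theorem bDigits_bounds : ∀ (fuel : Nat) (n d : Int), d ∈ bDigits fuel n → 0 ≤ d ∧ d ≤ 9 := by
  intro fuel
  induction fuel with
  | zero => intro n d h; simp [bDigits] at h
  | succ k ih =>
    intro n d h
    by_cases hn : n = 0
    · simp [bDigits, hn] at h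
    · simp only [bDigits, if_neg hn, List.mem_cons] at h
      rcases h with h | h
      · subst h
        rw [PySem.Int.mod_eq_emod_of_pos (by omega)]
        constructor
        · exact Int.emod_nonneg n (by omega)
        · have := Int.emod_lt_of_pos n (by omega : (0:Int) < 10); omega
      · exact ih _ _ h

-- count as Int: PySem.List.count = List.count
theorem main_lemma (n : Int) (_hn : 0 ≤ n) : min_num_count n = min_num_count_alt n := by
  unfold min_num_count min_num_count_alt
  rw [aLoop_eq_fold, fold_inv]
  cases hds : bDigits (n.natAbs + 1) n with
  | nil => simp [PySem.List.min?]
  | cons x t =>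
    have hx9 : x ≤ 9 := (bDigits_bounds _ _ x (by rw [hds]; exact List.mem_cons_self)).2
    have h9 : min (9 : Int) x = x := min_eq_right hx9
    have hm : PySem.List.min? (x :: t) (fun y : Int => y) = some (t.foldl min x) :=
      PySem.List.min?_id_cons x t
    simp only [hm, PySem.List.count_eq, List.foldl_cons, h9]
    have hle : t.foldl min x ≤ x := foldl_min_le_init _ _
    by_cases he : t.foldl min x = 9 <;> simp [he] <;> omega

-- ===== VERDICT (by name: the statement is the Claim_ definition above) =====
theorem min_num_count_spec : Claim_equal_min_num_count := by
  intro n _ hpre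
  unfold Spec_min_num_count
  exact main_lemma n hpre
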